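-- pv_equiv track=rewrite | github.com/wdw0/Sequential-Clustering | clustering.py | formar_grupos
-- ===== SOURCE A (Python) =====
-- from collections import defaultdict
--
-- def formar_grupos(ligacoes, num_pontos, k):
--     ##forma K grupos cortando as K-1 maiores ligacoes, usei union-find para agrupar.
--
--
--     ligacoes.sort(key=lambda x: x[2], reverse = True)
--     ligacoes_separadas = ligacoes[k - 1:] #removendo as K-1 maiores ligacoes
--     # Inicializa os pais de cada ponto (Union-Find)
--     pais = {i: i for i in range(1, num_pontos + 1)}
--
--     def encontrar(u):
--         # Encontra o representante do conjunto (com compressao de caminho)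
--         while pais[u] != u:
--             pais[u] = pais[pais[u]]
--             u = pais[u]
--         return u
--
--     def unir(u, v):
--         # Une dois conjuntos
--         ponto_u = encontrar(u)
--         ponto_v = encontrar(v)
--         if ponto_u != ponto_v:
--             pais[ponto_u] = ponto_v
--
--     # Une os pontos conforme as ligacoes restantes
--     for ponto_u, ponto_v, _ in ligacoes_separadas:
--         unir(ponto_u, ponto_v)
--
--     # Agrupa os pontos pelo representante de conjunto
--     grupos_map = defaultdict(list)
--     for i in range(1, num_pontos + 1):
--         grupos_map[encontrar(i)].append(i)
--
--     return list(grupos_map.values())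
-- ===== SOURCE B (Python) =====
-- def formar_grupos(ligacoes, num_pontos, k):
--     # Same in-place descending sort and slice as A; then connected components
--     # by DFS over an adjacency dict instead of union-find.
--     ligacoes.sort(key=lambda x: x[2], reverse=True)
--     kept = ligacoes[k - 1:]
--     adj = {i: [] for i in range(1, num_pontos + 1)}
--     for u, v, _ in kept:
--         adj[u].append(v)
--         adj[v].append(u)
--     visited = set()
--     grupos = []
--     for i in range(1, num_pontos + 1):
--         if i not in visited:
--             comp = []
--             stack = [i]
--             while stack:
--                 v = stack.pop()
--                 if v not in visited:
--                     visited.add(v)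
--                     comp.append(v)
--                     stack.extend(adj[v])
--             comp.sort()
--             grupos.append(comp)
--     return grupos
-- ===== Notes on version B (the rewrite author's own statement) =====
-- stated objective: alternative
-- what changed: Replaces the union-find (parent dict with path compression) by building an adjacency dict from the kept edges and collecting each group with an explicit-stack DFS plus a per-component ascending sort, keeping A's in-place descending sort and slice; Pre_ excludes exactly the inputs where a kept (non-cut) edge mentions a point outside 1..num_pontos, on which both A and B raise KeyError.
import Mathlib
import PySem

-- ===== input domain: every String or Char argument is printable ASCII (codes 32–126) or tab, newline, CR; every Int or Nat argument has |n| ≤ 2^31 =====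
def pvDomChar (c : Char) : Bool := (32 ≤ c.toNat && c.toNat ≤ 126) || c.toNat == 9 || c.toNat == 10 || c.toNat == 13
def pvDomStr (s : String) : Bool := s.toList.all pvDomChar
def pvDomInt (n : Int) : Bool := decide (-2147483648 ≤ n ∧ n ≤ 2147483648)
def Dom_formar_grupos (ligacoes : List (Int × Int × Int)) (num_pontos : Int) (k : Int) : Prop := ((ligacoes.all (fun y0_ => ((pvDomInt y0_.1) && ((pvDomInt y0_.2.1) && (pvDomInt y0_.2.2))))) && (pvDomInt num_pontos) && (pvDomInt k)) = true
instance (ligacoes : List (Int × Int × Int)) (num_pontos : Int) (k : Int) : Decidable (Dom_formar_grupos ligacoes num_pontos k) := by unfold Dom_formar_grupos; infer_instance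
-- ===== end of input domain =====

-- B replaces A's union-find (parent dict, path compression) by an adjacency dict and
-- iterative DFS per component; both perform the same in-place descending sort of `ligacoes`.
-- Equivalence is about the return value; the argument mutation (the sort) is identical in A and B.

-- ===== PORT A =====
-- the `while pais[u] != u` loop of `encontrar`; fuel makes it total (none = KeyError or fuel out;
-- under Pre_ the proof shows fuel num_pontos.toNat+1 always suffices)
def pvFind : Nat → PySem.Dict Int Int → Int → Option (PySem.Dict Int Int × Int)
  | 0, _, _ => none
  | fuel + 1, pais, u =>
    match pais.get? u with
    | none => none
    | some pu =>
      if pu = u then some (pais, u)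
      else
        match pais.get? pu with
        | none => none
        | some ppu => pvFind fuel (pais.insert u ppu) ppu

-- `unir`; on a `none` from pvFind (Python: KeyError, outside Pre_) it leaves the state unchanged
def pvUnir (fuel : Nat) (pais : PySem.Dict Int Int) (u v : Int) : PySem.Dict Int Int :=
  match pvFind fuel pais u with
  | none => pais
  | some (pais1, pu) =>
    match pvFind fuel pais1 v with
    | none => pais1
    | some (pais2, pv) => if pu ≠ pv then pais2.insert pu pv else pais2

def formar_grupos (ligacoes : List (Int × Int × Int)) (num_pontos : Int) (k : Int) : List (List Int) :=
  let ligs := PySem.List.sorted ligacoes (fun x => x.2.2) true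
  let kept := PySem.List.slice ligs (some (k - 1)) none
  let fuel := num_pontos.toNat + 1
  let pais0 := (PySem.List.pyRange 1 (num_pontos + 1) 1).foldl (fun d i => d.insert i i) PySem.Dict.empty
  let pais1 := kept.foldl (fun p e => pvUnir fuel p e.1 e.2.1) pais0
  let st := (PySem.List.pyRange 1 (num_pontos + 1) 1).foldl
    (fun (st : PySem.Dict Int Int × PySem.Dict Int (List Int)) i =>
      match pvFind fuel st.1 i with
      | none => st
      | some (p', r) => (p', st.2.modify r [] (fun g => g ++ [i])))
    (pais1, PySem.Dict.empty)
  st.2.values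

-- ===== PORT B =====
-- the `while stack:` DFS loop of Source B; fuel makes it total (the proof shows 2*|kept|+2 suffices)
def pvDfs : Nat → PySem.Dict Int (List Int) → List Int → PySem.Set Int → List Int →
    PySem.Set Int × List Int
  | 0, _, _, visited, comp => (visited, comp)
  | fuel + 1, adj, stack, visited, comp =>
    match PySem.List.pop? stack (-1) with
    | none => (visited, comp)
    | some (v, stack') =>
      if PySem.Set.contains visited v then pvDfs fuel adj stack' visited comp
      else pvDfs fuel adj (stack' ++ adj.getD v []) (PySem.Set.add visited v) (comp ++ [v])

def formar_grupos_alt (ligacoes : List (Int × Int × Int)) (num_pontos : Int) (k : Int) : List (List Int) :=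
  let ligs := PySem.List.sorted ligacoes (fun x => x.2.2) true
  let kept := PySem.List.slice ligs (some (k - 1)) none
  let adj0 := (PySem.List.pyRange 1 (num_pontos + 1) 1).foldl
    (fun d i => d.insert i ([] : List Int)) PySem.Dict.empty
  let adj := kept.foldl
    (fun d e => (d.modify e.1 [] (fun l => l ++ [e.2.1])).modify e.2.1 [] (fun l => l ++ [e.1])) adj0
  let fuel := 2 * kept.length + 2
  let st := (PySem.List.pyRange 1 (num_pontos + 1) 1).foldl
    (fun (st : PySem.Set Int × List (List Int)) i =>
      if PySem.Set.contains st.1 i then st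
      else
        let r := pvDfs fuel adj [i] st.1 []
        (r.1, st.2 ++ [PySem.List.sorted r.2 (fun x => x) false]))
    (PySem.Set.empty, [])
  st.2

-- ===== PRECONDITION & SPEC =====
-- Pre_ excludes exactly the inputs where a kept (non-cut) edge mentions a point outside
-- 1..num_pontos: there A raises KeyError (in `encontrar`), and B raises KeyError too (adj[u]).
def Pre_formar_grupos (ligacoes : List (Int × Int × Int)) (num_pontos : Int) (k : Int) : Prop :=
  ∀ e ∈ PySem.List.slice (PySem.List.sorted ligacoes (fun x => x.2.2) true) (some (k - 1)) none,
    (1 ≤ e.1 ∧ e.1 ≤ num_pontos) ∧ (1 ≤ e.2.1 ∧ e.2.1 ≤ num_pontos)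
instance (ligacoes : List (Int × Int × Int)) (num_pontos : Int) (k : Int) : Decidable (Pre_formar_grupos ligacoes num_pontos k) := by unfold Pre_formar_grupos; infer_instance

def pvWitness_formar_grupos : (List (Int × Int × Int)) × Int × Int := ([(1, 2, 3), (2, 3, 1)], 3, 2)

def Spec_formar_grupos (ligacoes : List (Int × Int × Int)) (num_pontos : Int) (k : Int) (out : List (List Int)) : Prop := out = formar_grupos_alt ligacoes num_pontos k
instance (ligacoes : List (Int × Int × Int)) (num_pontos : Int) (k : Int) (out : List (List Int)) : Decidable (Spec_formar_grupos ligacoes num_pontos k out) := by unfold Spec_formar_grupos; infer_instance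

-- ===== CLAIM (what is proved, stated in full; the proofs are below) =====
def Claim_equal_formar_grupos : Prop := ∀ (ligacoes : List (Int × Int × Int)) (num_pontos : Int) (k : Int), Dom_formar_grupos ligacoes num_pontos k → Pre_formar_grupos ligacoes num_pontos k → Spec_formar_grupos ligacoes num_pontos k (formar_grupos ligacoes num_pontos k)

-- ===== LEMMAS AND PROOFS =====

-- in-range predicate, the parent map as a function, roots of the parent forest
def pvInR (n u : Int) : Prop := 1 ≤ u ∧ u ≤ n
def pvP (d : PySem.Dict Int Int) : Int → Int := fun u => d.getD u u
def pvReaches (p : Int → Int) (u : Int) : Prop := ∃ k : Nat, p (p^[k] u) = p^[k] u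
noncomputable def pvDist (p : Int → Int) (u : Int) : Nat :=
  sInf {k : Nat | p (p^[k] u) = p^[k] u}
noncomputable def pvRoot (p : Int → Int) (u : Int) : Int := p^[pvDist p u] u
def pvGood (n : Int) (p : Int → Int) : Prop := ∀ u, pvInR n u → pvInR n (p u) ∧ pvReaches p u
def pvStep (E : List (Int × Int)) (a b : Int) : Prop := (a, b) ∈ E ∨ (b, a) ∈ E
def pvConn (E : List (Int × Int)) : Int → Int → Prop := Relation.ReflTransGen (pvStep E)
def pvRangeL (n : Int) : List Int := PySem.List.pyRange 1 (n + 1) 1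

-- ---- root / forest machinery ----

theorem pvReaches_succ {p : Int → Int} {u : Int} (h : pvReaches p u) : pvReaches p (p u) := by
  obtain ⟨k, hk⟩ := h
  refine ⟨k, ?_⟩
  have e : p^[k] (p u) = p^[k] u := by
    rw [← Function.iterate_succ_apply, Function.iterate_succ_apply', hk]
  rw [e, hk]

theorem pvRoot_fix {p : Int → Int} {u : Int} (h : pvReaches p u) :
    p (pvRoot p u) = pvRoot p u := Nat.sInf_mem h

theorem pvRoot_eq_of {p : Int → Int} {u r : Int} (h : pvReaches p u) {m : Nat}
    (hm : p^[m] u = r) (hr : p r = r) : pvRoot p u = r := by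
  have hfs : p (p^[pvDist p u] u) = p^[pvDist p u] u := Nat.sInf_mem h
  have hmem : p (p^[m] u) = p^[m] u := by rw [hm, hr]
  have hle : pvDist p u ≤ m := Nat.sInf_le hmem
  unfold pvRoot
  have e : p^[m] u = p^[m - pvDist p u] (p^[pvDist p u] u) := by
    rw [← Function.iterate_add_apply]
    congr 1
    omega
  rw [e, Function.iterate_fixed hfs] at hm
  exact hm

theorem pvRoot_iterate {p : Int → Int} {u : Int} :
    ∃ k : Nat, p^[k] u = pvRoot p u := ⟨pvDist p u, rfl⟩

theorem pvRoot_of_fix {p : Int → Int} {u : Int} (h : p u = u) : pvRoot p u = u :=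
  pvRoot_eq_of ⟨0, by simpa using h⟩ (m := 0) rfl h

theorem pvRoot_step {p : Int → Int} {u : Int} (h : pvReaches p u) :
    pvRoot p (p u) = pvRoot p u := by
  have e : p^[pvDist p u] (p u) = pvRoot p u := by
    rw [← Function.iterate_succ_apply, Function.iterate_succ_apply']
    exact pvRoot_fix h
  exact pvRoot_eq_of (pvReaches_succ h) e (pvRoot_fix h)

theorem pvDist_step {p : Int → Int} {u : Int} (h : pvReaches p u) (hne : p u ≠ u) :
    pvDist p u = pvDist p (p u) + 1 := by
  have h' := pvReaches_succ h
  have h1 : pvDist p u ≤ pvDist p (p u) + 1 := by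
    apply Nat.sInf_le
    show p (p^[pvDist p (p u) + 1] u) = p^[pvDist p (p u) + 1] u
    rw [Function.iterate_succ_apply]
    exact Nat.sInf_mem h'
  have h0 : pvDist p u ≠ 0 := by
    intro h0
    have hsp : p (p^[pvDist p u] u) = p^[pvDist p u] u := Nat.sInf_mem h
    rw [h0] at hsp
    simp at hsp
    exact hne hsp
  have h2 : pvDist p (p u) ≤ pvDist p u - 1 := by
    apply Nat.sInf_le
    show p (p^[pvDist p u - 1] (p u)) = p^[pvDist p u - 1] (p u)
    have e : p^[pvDist p u - 1] (p u) = p^[pvDist p u] u := by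
      rw [← Function.iterate_succ_apply]
      congr 1
      omega
    rw [e]
    exact Nat.sInf_mem h
  omega

theorem pvIter_inR {n : Int} {p : Int → Int} (hG : pvGood n p) {u : Int} (hu : pvInR n u) :
    ∀ k : Nat, pvInR n (p^[k] u) := by
  intro k
  induction k with
  | zero => simpa using hu
  | succ k ih => rw [Function.iterate_succ_apply']; exact (hG _ ih).1

theorem pvRoot_inR {n : Int} {p : Int → Int} (hG : pvGood n p) {u : Int} (hu : pvInR n u) :
    pvInR n (pvRoot p u) := pvIter_inR hG hu _

theorem pvDist_lt {n : Int} {p : Int → Int} (hG : pvGood n p) {u : Int} (hu : pvInR n u)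
    (h : pvReaches p u) : pvDist p u < n.toNat + 1 := by
  by_contra hc
  push_neg at hc
  have hinj : ∀ i j : Nat, i < j → j ≤ pvDist p u → p^[i] u ≠ p^[j] u := by
    intro i j hij hjle heq
    have hfix : p (p^[pvDist p u - (j - i)] u) = p^[pvDist p u - (j - i)] u := by
      have e1 : p^[pvDist p u - (j - i)] u = p^[pvDist p u - j] (p^[i] u) := by
        rw [← Function.iterate_add_apply]; congr 1; omega
      have e2 : p^[pvDist p u] u = p^[pvDist p u - j] (p^[j] u) := by
        rw [← Function.iterate_add_apply]; congr 1; omega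
      rw [e1, heq, ← e2]
      exact Nat.sInf_mem h
    have : pvDist p u ≤ pvDist p u - (j - i) :=
      Nat.sInf_le (show _ ∈ {k : Nat | p (p^[k] u) = p^[k] u} from hfix)
    omega
  have hmaps : ∀ k ∈ Finset.range (pvDist p u + 1), p^[k] u ∈ Finset.Icc (1 : Int) n := by
    intro k _
    have := pvIter_inR hG hu k
    simp only [Finset.mem_Icc]
    exact ⟨this.1, this.2⟩
  have hinj' : Set.InjOn (fun k => p^[k] u) (Finset.range (pvDist p u + 1)) := by
    intro i hi j hj hij
    simp only [Finset.coe_range, Set.mem_Iio] at hi hj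
    by_contra hne
    rcases Nat.lt_or_ge i j with hlt | hge
    · exact hinj i j hlt (by omega) hij
    · exact hinj j i (by omega) (by omega) hij.symm
  have hcard := Finset.card_le_card_of_injOn _ hmaps hinj'
  rw [Finset.card_range, Int.card_Icc] at hcard
  omega


-- ---- updating one parent pointer: path compression and union ----

def pvUpd (p : Int → Int) (a b : Int) : Int → Int := fun w => if w = a then b else p w

theorem pvReaches_pred {p : Int → Int} {x : Int} (h : pvReaches p (p x)) : pvReaches p x := by
  obtain ⟨k, hk⟩ := h
  exact ⟨k + 1, by rwa [Function.iterate_succ_apply]⟩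

theorem pvNoTwoCycle {p : Int → Int} {u : Int} (h : pvReaches p u) (hne : p u ≠ u) :
    p (p u) ≠ u := by
  intro h2
  have halt : ∀ k : Nat, p^[k] u = u ∨ p^[k] u = p u := by
    intro k
    induction k with
    | zero => left; rfl
    | succ k ih =>
      rw [Function.iterate_succ_apply']
      rcases ih with e | e
      · rw [e]; right; rfl
      · rw [e, h2]; left; rfl
  have hsp := pvRoot_fix h
  obtain ⟨k, hk⟩ := pvRoot_iterate (p := p) (u := u)
  rcases halt k with e | e <;> rw [e] at hk
  · rw [← hk] at hsp; exact hne hsp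
  · rw [← hk] at hsp
    rw [h2] at hsp
    exact hne hsp.symm

theorem pvRoot_root {p : Int → Int} {u : Int} (h : pvReaches p u) :
    pvRoot p (pvRoot p u) = pvRoot p u := pvRoot_of_fix (pvRoot_fix h)

theorem pvCompress {n : Int} {p : Int → Int} (hG : pvGood n p) {u : Int} (hu : pvInR n u)
    (hne : p u ≠ u) :
    ∀ d : Nat, ∀ v, pvInR n v → pvDist p v ≤ d →
      pvReaches (pvUpd p u (p (p u))) v ∧
      pvDist (pvUpd p u (p (p u))) v ≤ pvDist p v ∧
      pvRoot (pvUpd p u (p (p u))) v = pvRoot p v := by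
  have hRu := (hG u hu).2
  have hw : p (p u) ≠ u := pvNoTwoCycle hRu hne
  intro d
  induction d with
  | zero =>
    intro v hv hd
    have hRv := (hG v hv).2
    have hfix : p v = v := by
      have := pvRoot_fix hRv
      unfold pvRoot at this
      rw [Nat.le_zero.mp hd] at this
      simpa using this
    have hvne : v ≠ u := fun e => hne (e ▸ hfix)
    have hfix' : pvUpd p u (p (p u)) v = v := by simp [pvUpd, hvne, hfix]
    refine ⟨⟨0, by simpa using hfix'⟩, ?_, by rw [pvRoot_of_fix hfix', pvRoot_of_fix hfix]⟩
    have : pvDist (pvUpd p u (p (p u))) v = 0 :=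
      Nat.le_zero.mp (Nat.sInf_le (show _ ∈ {k : Nat | _} from by simpa using hfix'))
    omega
  | succ d ih =>
    intro v hv hd
    have hRv := (hG v hv).2
    by_cases hfix : p v = v
    · have hvne : v ≠ u := fun e => hne (e ▸ hfix)
      have hfix' : pvUpd p u (p (p u)) v = v := by simp [pvUpd, hvne, hfix]
      refine ⟨⟨0, by simpa using hfix'⟩, ?_, by rw [pvRoot_of_fix hfix', pvRoot_of_fix hfix]⟩
      have : pvDist (pvUpd p u (p (p u))) v = 0 :=
        Nat.le_zero.mp (Nat.sInf_le (show _ ∈ {k : Nat | _} from by simpa using hfix'))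
      omega
    · have hdv : pvDist p v = pvDist p (p v) + 1 := pvDist_step hRv hfix
      by_cases hvu : v = u
      · subst hvu
        -- v = u : new parent is the grandparent p (p v)
        have hpuR : pvInR n (p v) := (hG v hv).1
        have hRpu := (hG _ hpuR).2
        have hwR : pvInR n (p (p v)) := (hG _ hpuR).1
        have hdw : pvDist p (p (p v)) ≤ d := by
          by_cases hpf : p (p v) = p v
          · rw [hpf]
            by_cases hppf : p (p v) = p v
            · have : pvDist p (p v) = 0 :=
                Nat.le_zero.mp (Nat.sInf_le (show _ ∈ {k : Nat | _} from by simpa using hpf))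
              omega
            · exact absurd hpf hppf
          · have := pvDist_step hRpu hpf
            omega
        obtain ⟨hR'w, hd'w, hr'w⟩ := ih _ hwR hdw
        have hstep : pvUpd p v (p (p v)) v = p (p v) := by simp [pvUpd]
        have hR'v : pvReaches (pvUpd p v (p (p v))) v := by
          apply pvReaches_pred
          rwa [hstep]
        have hne' : pvUpd p v (p (p v)) v ≠ v := by rw [hstep]; exact hw
        have hd'v : pvDist (pvUpd p v (p (p v))) v
            = pvDist (pvUpd p v (p (p v))) (p (p v)) + 1 := by
          have := pvDist_step hR'v hne'
          rwa [hstep] at this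
        have hroots : pvRoot p (p (p v)) = pvRoot p v := by
          rw [pvRoot_step (pvReaches_succ hRv), pvRoot_step hRv]
        refine ⟨hR'v, ?_, ?_⟩
        · -- distance does not increase
          by_cases hpf : p (p v) = p v
          · have h1 : pvDist p (p v) = 0 :=
              Nat.le_zero.mp (Nat.sInf_le (show _ ∈ {k : Nat | _} from by simpa using hpf))
            rw [hpf] at hd'w hd'v ⊢
            omega
          · have h2 := pvDist_step hRpu hpf
            omega
        · rw [← pvRoot_step hR'v, hstep, hr'w, hroots]
      · -- v ≠ u : parent unchanged
        have hpvR : pvInR n (p v) := (hG v hv).1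
        obtain ⟨hR'pv, hd'pv, hr'pv⟩ := ih _ hpvR (by omega)
        have hstep : pvUpd p u (p (p u)) v = p v := by simp [pvUpd, hvu]
        have hR'v : pvReaches (pvUpd p u (p (p u))) v := by
          apply pvReaches_pred
          rwa [hstep]
        have hne' : pvUpd p u (p (p u)) v ≠ v := by rw [hstep]; exact hfix
        have hd'v := pvDist_step hR'v hne'
        rw [hstep] at hd'v
        refine ⟨hR'v, by omega, ?_⟩
        rw [← pvRoot_step hR'v, hstep, hr'pv, pvRoot_step hRv]

theorem pvLink {n : Int} {p : Int → Int} (hG : pvGood n p) {r1 r2 : Int}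
    (_h1 : pvInR n r1) (_h2 : pvInR n r2) (hf1 : p r1 = r1) (hf2 : p r2 = r2) (hne : r1 ≠ r2) :
    ∀ d : Nat, ∀ v, pvInR n v → pvDist p v ≤ d →
      pvReaches (pvUpd p r1 r2) v ∧
      pvRoot (pvUpd p r1 r2) v = (if pvRoot p v = r1 then r2 else pvRoot p v) := by
  have hfix2' : pvUpd p r1 r2 r2 = r2 := by simp [pvUpd, (Ne.symm hne), hf2]
  intro d
  induction d with
  | zero =>
    intro v hv hd
    have hRv := (hG v hv).2
    have hfix : p v = v := by
      have := pvRoot_fix hRv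
      unfold pvRoot at this
      rw [Nat.le_zero.mp hd] at this
      simpa using this
    have hrv : pvRoot p v = v := pvRoot_of_fix hfix
    by_cases hv1 : v = r1
    · have hstep : pvUpd p r1 r2 v = r2 := by simp [pvUpd, hv1]
      have hR' : pvReaches (pvUpd p r1 r2) v := by
        apply pvReaches_pred
        rw [hstep]
        exact ⟨0, by simpa using hfix2'⟩
      refine ⟨hR', ?_⟩
      rw [← pvRoot_step hR', hstep, pvRoot_of_fix hfix2', hrv, if_pos hv1]
    · have hstep : pvUpd p r1 r2 v = v := by simp [pvUpd, hv1, hfix]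
      refine ⟨⟨0, by simpa using hstep⟩, ?_⟩
      rw [pvRoot_of_fix hstep, hrv, if_neg hv1]
  | succ d ih =>
    intro v hv hd
    have hRv := (hG v hv).2
    by_cases hfix : p v = v
    · have hrv : pvRoot p v = v := pvRoot_of_fix hfix
      by_cases hv1 : v = r1
      · have hstep : pvUpd p r1 r2 v = r2 := by simp [pvUpd, hv1]
        have hR' : pvReaches (pvUpd p r1 r2) v := by
          apply pvReaches_pred
          rw [hstep]
          exact ⟨0, by simpa using hfix2'⟩
        refine ⟨hR', ?_⟩
        rw [← pvRoot_step hR', hstep, pvRoot_of_fix hfix2', hrv, if_pos hv1]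
      · have hstep : pvUpd p r1 r2 v = v := by simp [pvUpd, hv1, hfix]
        refine ⟨⟨0, by simpa using hstep⟩, ?_⟩
        rw [pvRoot_of_fix hstep, hrv, if_neg hv1]
    · have hv1 : v ≠ r1 := fun e => hfix (by rw [e, hf1])
      have hdv : pvDist p v = pvDist p (p v) + 1 := pvDist_step hRv hfix
      have hpvR : pvInR n (p v) := (hG v hv).1
      obtain ⟨hR'pv, hr'pv⟩ := ih _ hpvR (by omega)
      have hstep : pvUpd p r1 r2 v = p v := by simp [pvUpd, hv1]
      have hR'v : pvReaches (pvUpd p r1 r2) v := by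
        apply pvReaches_pred
        rwa [hstep]
      refine ⟨hR'v, ?_⟩
      rw [← pvRoot_step hR'v, hstep, hr'pv, pvRoot_step hRv]

-- ---- the dict-level `encontrar` and `unir` ----

theorem pvContains_iff {n : Int} {d : PySem.Dict Int Int} (hk : d.keys = pvRangeL n) (v : Int) :
    d.contains v = true ↔ pvInR n v := by
  rw [PySem.Dict.contains_iff_mem_keys, hk]
  unfold pvRangeL
  rw [PySem.List.mem_pyRange_one]
  unfold pvInR
  omega

theorem pvGet_eq {n : Int} {d : PySem.Dict Int Int} (hk : d.keys = pvRangeL n) {v : Int}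
    (hv : pvInR n v) : d.get? v = some (pvP d v) := by
  have hc : d.contains v = true := (pvContains_iff hk v).mpr hv
  rw [PySem.Dict.contains_eq_isSome_get?] at hc
  obtain ⟨x, hx⟩ := Option.isSome_iff_exists.mp hc
  rw [hx]
  unfold pvP
  rw [PySem.Dict.getD_eq_get?_getD, hx]
  rfl

theorem pvP_insert (d : PySem.Dict Int Int) (a b : Int) :
    pvP (d.insert a b) = pvUpd (pvP d) a b := by
  funext w
  unfold pvP pvUpd
  rw [PySem.Dict.getD_insert]

theorem pvKeys_insert {n : Int} {d : PySem.Dict Int Int} (hk : d.keys = pvRangeL n) {a : Int}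
    (ha : pvInR n a) (b : Int) : (d.insert a b).keys = pvRangeL n := by
  rw [PySem.Dict.keys_insert_of_contains d b ((pvContains_iff hk a).mpr ha), hk]

theorem pvFind_spec {n : Int} : ∀ d : Nat, ∀ (pais : PySem.Dict Int Int) (u : Int) (f : Nat),
    pais.keys = pvRangeL n → pvGood n (pvP pais) → pvInR n u →
    pvDist (pvP pais) u ≤ d → d < f →
    ∃ pais', pvFind f pais u = some (pais', pvRoot (pvP pais) u) ∧
      pais'.keys = pvRangeL n ∧ pvGood n (pvP pais') ∧
      (∀ v, pvInR n v → pvRoot (pvP pais') v = pvRoot (pvP pais) v) := by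
  intro d
  induction d with
  | zero =>
    intro pais u f hk hG hu hd hf
    obtain ⟨f', rfl⟩ : ∃ f', f = f' + 1 := ⟨f - 1, by omega⟩
    have hfix : pvP pais u = u := by
      have := pvRoot_fix (hG u hu).2
      unfold pvRoot at this
      rw [Nat.le_zero.mp hd] at this
      simpa using this
    refine ⟨pais, ?_, hk, hG, fun v _ => rfl⟩
    rw [pvRoot_of_fix hfix]
    simp only [pvFind, pvGet_eq hk hu, hfix]
    simp
  | succ d ih =>
    intro pais u f hk hG hu hd hf
    obtain ⟨f', rfl⟩ : ∃ f', f = f' + 1 := ⟨f - 1, by omega⟩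
    by_cases hfix : pvP pais u = u
    · refine ⟨pais, ?_, hk, hG, fun v _ => rfl⟩
      rw [pvRoot_of_fix hfix]
      simp only [pvFind, pvGet_eq hk hu, hfix]
      simp
    · have hpu : pvInR n (pvP pais u) := (hG u hu).1
      have hppu : pvInR n (pvP pais (pvP pais u)) := (hG _ hpu).1
      have hRu := (hG u hu).2
      have hdu : pvDist (pvP pais) u = pvDist (pvP pais) (pvP pais u) + 1 :=
        pvDist_step hRu hfix
      have hcomp := pvCompress hG hu hfix
      have hG1 : pvGood n (pvUpd (pvP pais) u (pvP pais (pvP pais u))) := by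
        intro w hw
        refine ⟨?_, (hcomp (pvDist (pvP pais) w) w hw le_rfl).1⟩
        unfold pvUpd
        split
        · exact hppu
        · exact (hG w hw).1
      -- distance of the grandparent in the compressed map
      have hdppu : pvDist (pvP pais) (pvP pais (pvP pais u)) ≤ d := by
        by_cases hpf : pvP pais (pvP pais u) = pvP pais u
        · rw [hpf]
          have := pvDist_step hRu hfix
          have h0 : pvDist (pvP pais) (pvP pais u) = 0 :=
            Nat.le_zero.mp (Nat.sInf_le (show _ ∈ {k : Nat | _} from by simpa using hpf))
          omega
        · have := pvDist_step (hG _ hpu).2 hpf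
          omega
      have hd1 : pvDist (pvUpd (pvP pais) u (pvP pais (pvP pais u)))
          (pvP pais (pvP pais u)) ≤ d := by
        have := (hcomp (pvDist (pvP pais) (pvP pais (pvP pais u))) _ hppu le_rfl).2.1
        omega
      obtain ⟨pais', hrun, hk', hG', hpres⟩ :=
        ih (pais.insert u (pvP pais (pvP pais u))) (pvP pais (pvP pais u)) f'
          (pvKeys_insert hk hu _) (by rw [pvP_insert]; exact hG1) hppu
          (by rw [pvP_insert]; exact hd1) (by omega)
      refine ⟨pais', ?_, hk', hG', ?_⟩
      · simp only [pvFind, pvGet_eq hk hu, if_neg hfix, pvGet_eq hk hpu]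
        rw [hrun]
        have e1 : pvRoot (pvP (pais.insert u (pvP pais (pvP pais u))))
            (pvP pais (pvP pais u)) = pvRoot (pvP pais) (pvP pais (pvP pais u)) := by
          rw [pvP_insert]
          exact (hcomp (pvDist (pvP pais) (pvP pais (pvP pais u))) _ hppu le_rfl).2.2
        rw [e1, pvRoot_step (pvReaches_succ hRu), pvRoot_step hRu]
      · intro v hv
        rw [hpres v hv, pvP_insert]
        exact (hcomp (pvDist (pvP pais) v) v hv le_rfl).2.2

theorem pvFind_run {n : Int} {pais : PySem.Dict Int Int} {u : Int}
    (hk : pais.keys = pvRangeL n) (hG : pvGood n (pvP pais)) (hu : pvInR n u) :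
    ∃ pais', pvFind (n.toNat + 1) pais u = some (pais', pvRoot (pvP pais) u) ∧
      pais'.keys = pvRangeL n ∧ pvGood n (pvP pais') ∧
      (∀ v, pvInR n v → pvRoot (pvP pais') v = pvRoot (pvP pais) v) :=
  pvFind_spec (pvDist (pvP pais) u) pais u (n.toNat + 1) hk hG hu le_rfl
    (pvDist_lt hG hu (hG u hu).2)

theorem pvUnir_spec {n : Int} {pais : PySem.Dict Int Int} {u v : Int}
    (hk : pais.keys = pvRangeL n) (hG : pvGood n (pvP pais)) (hu : pvInR n u)
    (hv : pvInR n v) :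
    (pvUnir (n.toNat + 1) pais u v).keys = pvRangeL n ∧
    pvGood n (pvP (pvUnir (n.toNat + 1) pais u v)) ∧
    ∀ a b, pvInR n a → pvInR n b →
      (pvRoot (pvP (pvUnir (n.toNat + 1) pais u v)) a
          = pvRoot (pvP (pvUnir (n.toNat + 1) pais u v)) b ↔
        (pvRoot (pvP pais) a = pvRoot (pvP pais) b ∨
         (pvRoot (pvP pais) a = pvRoot (pvP pais) u ∧
          pvRoot (pvP pais) v = pvRoot (pvP pais) b) ∨
         (pvRoot (pvP pais) a = pvRoot (pvP pais) v ∧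
          pvRoot (pvP pais) u = pvRoot (pvP pais) b))) := by
  obtain ⟨pais1, hrun1, hk1, hG1, hpres1⟩ := pvFind_run hk hG hu
  obtain ⟨pais2, hrun2, hk2, hG2, hpres2⟩ := pvFind_run hk1 hG1 hv
  have hru : pvInR n (pvRoot (pvP pais) u) := pvRoot_inR hG hu
  have hrv : pvInR n (pvRoot (pvP pais) v) := pvRoot_inR hG hv
  have hr2u : pvRoot (pvP pais2) (pvRoot (pvP pais) u) = pvRoot (pvP pais) u := by
    rw [hpres2 _ hru, hpres1 _ hru, pvRoot_root (hG u hu).2]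
  have hr2v : pvRoot (pvP pais2) (pvRoot (pvP pais) v) = pvRoot (pvP pais) v := by
    have e1 : pvRoot (pvP pais1) v = pvRoot (pvP pais) v := hpres1 v hv
    rw [hpres2 _ hrv, ← e1, pvRoot_root (hG1 v hv).2]
  have hf2u : pvP pais2 (pvRoot (pvP pais) u) = pvRoot (pvP pais) u := by
    have := pvRoot_fix (hG2 _ hru).2
    rwa [hr2u] at this
  have hf2v : pvP pais2 (pvRoot (pvP pais) v) = pvRoot (pvP pais) v := by
    have := pvRoot_fix (hG2 _ hrv).2
    rwa [hr2v] at this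
  have hroot1v : pvRoot (pvP pais1) v = pvRoot (pvP pais) v := hpres1 v hv
  have hunir : pvUnir (n.toNat + 1) pais u v =
      (if pvRoot (pvP pais) u ≠ pvRoot (pvP pais) v
        then pais2.insert (pvRoot (pvP pais) u) (pvRoot (pvP pais) v) else pais2) := by
    simp only [pvUnir, hrun1, hrun2, hroot1v]
  by_cases hne : pvRoot (pvP pais) u = pvRoot (pvP pais) v
  · rw [hunir, if_neg (by simpa using hne)]
    refine ⟨hk2, hG2, fun a b ha hb => ?_⟩
    rw [hpres2 a ha, hpres2 b hb, hpres1 a ha, hpres1 b hb]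
    constructor
    · intro h
      exact Or.inl h
    · intro h
      rcases h with h | ⟨h1, h2⟩ | ⟨h1, h2⟩
      · exact h
      · rw [h1, hne, h2]
      · rw [h1, ← hne, h2]
  · rw [hunir, if_pos (by simpa using hne)]
    have hlink := pvLink hG2 hru hrv hf2u hf2v hne
    have hkey : ∀ w, pvInR n w →
        pvRoot (pvP (pais2.insert (pvRoot (pvP pais) u) (pvRoot (pvP pais) v))) w =
          (if pvRoot (pvP pais) w = pvRoot (pvP pais) u then pvRoot (pvP pais) v
            else pvRoot (pvP pais) w) := by
      intro w hw
      rw [pvP_insert]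
      have := (hlink (pvDist (pvP pais2) w) w hw le_rfl).2
      rw [this, hpres2 w hw, hpres1 w hw]
    refine ⟨pvKeys_insert hk2 hru _, ?_, fun a b ha hb => ?_⟩
    · intro w hw
      rw [pvP_insert]
      refine ⟨?_, (hlink (pvDist (pvP pais2) w) w hw le_rfl).1⟩
      unfold pvUpd
      split
      · exact hrv
      · exact (hG2 w hw).1
    · rw [hkey a ha, hkey b hb]
      by_cases h1 : pvRoot (pvP pais) a = pvRoot (pvP pais) u <;>
        by_cases h2 : pvRoot (pvP pais) b = pvRoot (pvP pais) u
      · rw [if_pos h1, if_pos h2]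
        exact ⟨fun _ => Or.inl (h1.trans h2.symm), fun _ => rfl⟩
      · rw [if_pos h1, if_neg h2]
        constructor
        · intro hx
          exact Or.inr (Or.inl ⟨h1, hx⟩)
        · intro hx
          rcases hx with hx | ⟨hx1, hx2⟩ | ⟨hx1, hx2⟩
          · exact absurd (hx.symm.trans h1) h2
          · exact hx2
          · exact absurd (h1.symm.trans hx1) hne
      · rw [if_neg h1, if_pos h2]
        constructor
        · intro hx
          exact Or.inr (Or.inr ⟨hx, h2.symm⟩)
        · intro hx
          rcases hx with hx | ⟨hx1, hx2⟩ | ⟨hx1, hx2⟩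
          · exact absurd (hx.trans h2) h1
          · exact absurd hx1 h1
          · exact hx1
      · rw [if_neg h1, if_neg h2]
        constructor
        · intro hx
          exact Or.inl hx
        · intro hx
          rcases hx with hx | ⟨hx1, hx2⟩ | ⟨hx1, hx2⟩
          · exact hx
          · exact absurd hx1 h1
          · exact absurd hx2.symm h2

-- ---- connectivity over an edge list ----

theorem pvStep_symmetric (E : List (Int × Int)) : Symmetric (pvStep E) := by
  intro a b h
  rcases h with h | h
  · exact Or.inr h
  · exact Or.inl h

theorem pvConn_symm {E : List (Int × Int)} {a b : Int} (h : pvConn E a b) : pvConn E b a :=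
  Relation.ReflTransGen.symmetric (pvStep_symmetric E) h

theorem pvConn_mono {E E' : List (Int × Int)} (hsub : ∀ a b, pvStep E a b → pvStep E' a b)
    {a b : Int} (h : pvConn E a b) : pvConn E' a b :=
  Relation.ReflTransGen.mono (fun {x y} => hsub x y) h

theorem pvStep_append_iff {E : List (Int × Int)} {u v a b : Int} :
    pvStep (E ++ [(u, v)]) a b ↔ pvStep E a b ∨ (a = u ∧ b = v) ∨ (a = v ∧ b = u) := by
  unfold pvStep
  simp only [List.mem_append, List.mem_singleton, Prod.mk.injEq]
  tauto

theorem pvConn_extend {E : List (Int × Int)} {u v a b : Int} :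
    pvConn (E ++ [(u, v)]) a b ↔
      pvConn E a b ∨ (pvConn E a u ∧ pvConn E v b) ∨ (pvConn E a v ∧ pvConn E u b) := by
  constructor
  · intro h
    induction h with
    | refl => exact Or.inl Relation.ReflTransGen.refl
    | @tail b c hab hbc ih =>
      rcases pvStep_append_iff.mp hbc with hs | ⟨he1, he2⟩ | ⟨he1, he2⟩
      · rcases ih with h | ⟨h1, h2⟩ | ⟨h1, h2⟩
        · exact Or.inl (h.tail hs)
        · exact Or.inr (Or.inl ⟨h1, h2.tail hs⟩)
        · exact Or.inr (Or.inr ⟨h1, h2.tail hs⟩)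
      · subst he1; subst he2
        rcases ih with h | ⟨h1, h2⟩ | ⟨h1, h2⟩
        · exact Or.inr (Or.inl ⟨h, Relation.ReflTransGen.refl⟩)
        · exact Or.inr (Or.inl ⟨h1, Relation.ReflTransGen.refl⟩)
        · exact Or.inl h1
      · subst he1; subst he2
        rcases ih with h | ⟨h1, h2⟩ | ⟨h1, h2⟩
        · exact Or.inr (Or.inr ⟨h, Relation.ReflTransGen.refl⟩)
        · exact Or.inl h1
        · exact Or.inr (Or.inr ⟨h1, Relation.ReflTransGen.refl⟩)
  · intro h
    have hsub : ∀ x y, pvStep E x y → pvStep (E ++ [(u, v)]) x y := by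
      intro x y hs
      rcases hs with hs | hs
      · exact Or.inl (List.mem_append_left _ hs)
      · exact Or.inr (List.mem_append_left _ hs)
    have huv : pvConn (E ++ [(u, v)]) u v :=
      Relation.ReflTransGen.single (Or.inl (List.mem_append_right _ (List.mem_singleton.mpr rfl)))
    rcases h with h | ⟨h1, h2⟩ | ⟨h1, h2⟩
    · exact pvConn_mono hsub h
    · exact ((pvConn_mono hsub h1).trans huv).trans (pvConn_mono hsub h2)
    · exact ((pvConn_mono hsub h1).trans (pvConn_symm huv)).trans (pvConn_mono hsub h2)

theorem pvConn_nil {a b : Int} (h : pvConn [] a b) : a = b := by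
  induction h with
  | refl => rfl
  | tail _ hbc _ => rcases hbc with hs | hs <;> simp at hs

theorem pvConn_inR {n : Int} {E : List (Int × Int)}
    (hE : ∀ e ∈ E, pvInR n e.1 ∧ pvInR n e.2) {a b : Int} (h : pvConn E a b) :
    a = b ∨ pvInR n b := by
  induction h with
  | refl => exact Or.inl rfl
  | tail _ hbc _ =>
    rcases hbc with hs | hs
    · exact Or.inr (hE _ hs).2
    · exact Or.inr (hE _ hs).1

-- ---- the union fold computes connectivity of the processed edges ----

theorem pvUF_fold {n : Int} :
    ∀ (es : List (Int × Int × Int)) (pais : PySem.Dict Int Int) (E : List (Int × Int)),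
    pais.keys = pvRangeL n → pvGood n (pvP pais) →
    (∀ a b, pvInR n a → pvInR n b →
      (pvRoot (pvP pais) a = pvRoot (pvP pais) b ↔ pvConn E a b)) →
    (∀ e ∈ es, pvInR n e.1 ∧ pvInR n e.2.1) →
    (es.foldl (fun p e => pvUnir (n.toNat + 1) p e.1 e.2.1) pais).keys = pvRangeL n ∧
    pvGood n (pvP (es.foldl (fun p e => pvUnir (n.toNat + 1) p e.1 e.2.1) pais)) ∧
    (∀ a b, pvInR n a → pvInR n b →
      (pvRoot (pvP (es.foldl (fun p e => pvUnir (n.toNat + 1) p e.1 e.2.1) pais)) a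
        = pvRoot (pvP (es.foldl (fun p e => pvUnir (n.toNat + 1) p e.1 e.2.1) pais)) b ↔
        pvConn (E ++ es.map (fun e => (e.1, e.2.1))) a b)) := by
  intro es
  induction es with
  | nil =>
    intro pais E hk hG hEq _
    simpa using ⟨hk, hG, hEq⟩
  | cons e es ih =>
    intro pais E hk hG hEq hes
    have he := hes e (List.mem_cons_self)
    obtain ⟨hk1, hG1, hiff⟩ := pvUnir_spec hk hG he.1 he.2
    have hEq1 : ∀ a b, pvInR n a → pvInR n b →
        (pvRoot (pvP (pvUnir (n.toNat + 1) pais e.1 e.2.1)) a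
          = pvRoot (pvP (pvUnir (n.toNat + 1) pais e.1 e.2.1)) b ↔
          pvConn (E ++ [(e.1, e.2.1)]) a b) := by
      intro a b ha hb
      rw [hiff a b ha hb, pvConn_extend]
      rw [hEq a b ha hb, hEq a e.1 ha he.1, hEq e.2.1 b he.2 hb,
        hEq a e.2.1 ha he.2, hEq e.1 b he.1 hb]
    have := ih (pvUnir (n.toNat + 1) pais e.1 e.2.1) (E ++ [(e.1, e.2.1)]) hk1 hG1 hEq1
      (fun e' he' => hes e' (List.mem_cons_of_mem _ he'))
    simpa [List.append_assoc] using this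

-- ---- the initial parent map {i : i} ----

theorem pvFoldAdd_of_nodup {α : Type} [BEq α] [LawfulBEq α] :
    ∀ (xs s : List α), (∀ x ∈ xs, x ∉ s) → xs.Nodup →
      xs.foldl PySem.Set.add s = s ++ xs := by
  intro xs
  induction xs with
  | nil => intro s _ _; simp
  | cons x xs ih =>
    intro s hdis hnd
    have hx : x ∉ s := hdis x List.mem_cons_self
    have hadd : PySem.Set.add s x = s ++ [x] := by
      unfold PySem.Set.add
      rw [if_neg (by simpa using hx)]
    rw [List.foldl_cons, hadd, ih (s ++ [x]) ?_ (List.Nodup.of_cons hnd)]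
    · simp
    · intro y hy
      simp only [List.mem_append, List.mem_singleton]
      rintro (h | rfl)
      · exact hdis y (List.mem_cons_of_mem _ hy) h
      · exact (List.nodup_cons.mp hnd).1 hy

theorem pvSet_ofList_nodup {α : Type} [BEq α] [LawfulBEq α] {xs : List α} (h : xs.Nodup) :
    PySem.Set.ofList xs = xs := by
  rw [PySem.Set.ofList_eq_foldl, pvFoldAdd_of_nodup xs [] (by simp) h]
  simp

theorem pvInit_keys {n : Int} :
    ((pvRangeL n).foldl (fun d i => d.insert i i) PySem.Dict.empty).keys = pvRangeL n := by
  rw [show (fun (d : PySem.Dict Int Int) (i : Int) => d.insert i i)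
      = fun d i => d.insert i ((fun (_ : PySem.Dict Int Int) (x : Int) => x) d i) from rfl]
  rw [PySem.Dict.keys_foldl_insert]
  rw [PySem.Dict.keys_empty]
  exact pvSet_ofList_nodup (by unfold pvRangeL; exact PySem.List.nodup_pyRange_one 1 (n+1))

theorem pvInit_getD {n : Int} :
    ∀ v, pvP ((pvRangeL n).foldl (fun d i => d.insert i i) PySem.Dict.empty) v = v := by
  suffices h : ∀ (l : List Int) (d : PySem.Dict Int Int), (∀ w, d.getD w w = w) →
      ∀ v, (l.foldl (fun d i => d.insert i i) d).getD v v = v by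
    intro v
    exact h (pvRangeL n) PySem.Dict.empty (fun w => by rw [PySem.Dict.getD_empty]) v
  intro l
  induction l with
  | nil => intro d hd v; exact hd v
  | cons x l ih =>
    intro d hd v
    rw [List.foldl_cons]
    apply ih
    intro w
    rw [PySem.Dict.getD_insert]
    split
    · rename_i h; exact h.symm ▸ rfl
    · exact hd w

-- ---- the A-side grouping pass ----

theorem pvGroup_fold {n : Int} (R : Int → Int) :
    ∀ (xs : List Int) (pais : PySem.Dict Int Int) (dct : PySem.Dict Int (List Int)),
    pais.keys = pvRangeL n → pvGood n (pvP pais) →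
    (∀ v, pvInR n v → pvRoot (pvP pais) v = R v) →
    (∀ x ∈ xs, pvInR n x) →
    (xs.foldl (fun (st : PySem.Dict Int Int × PySem.Dict Int (List Int)) i =>
        match pvFind (n.toNat + 1) st.1 i with
        | none => st
        | some (p', r) => (p', st.2.modify r [] (fun g => g ++ [i]))) (pais, dct)).2
      = xs.foldl (fun d i => d.modify (R i) [] (fun g => g ++ [i])) dct := by
  intro xs
  induction xs with
  | nil => intro pais dct _ _ _ _; rfl
  | cons x xs ih =>
    intro pais dct hk hG hR hxs
    have hx := hxs x List.mem_cons_self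
    obtain ⟨pais', hrun, hk', hG', hpres⟩ := pvFind_run hk hG hx
    rw [List.foldl_cons, List.foldl_cons]
    have hstep : (match pvFind (n.toNat + 1) pais x with
        | none => (pais, dct)
        | some (p', r) => (p', dct.modify r [] (fun g => g ++ [x])))
        = (pais', dct.modify (R x) [] (fun g => g ++ [x])) := by
      rw [hrun, hR x hx]
    rw [hstep]
    exact ih pais' _ hk' hG' (fun v hv => by rw [hpres v hv, hR v hv]) 
      (fun y hy => hxs y (List.mem_cons_of_mem _ hy))

theorem pvA_values (R : Int → Int) (l : List Int) :
    (l.foldl (fun d i => d.modify (R i) [] (fun g => g ++ [i])) PySem.Dict.empty).values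
      = (PySem.Set.ofList (l.map R)).map (fun c => l.filter (fun i => R i == c)) := by
  have hnd : (l.foldl (fun d i => d.modify (R i) [] (fun g => g ++ [i]))
      PySem.Dict.empty).keys.Nodup := by
    apply PySem.Dict.nodup_keys_foldl_modify_key l R [] (fun _ i => fun g => g ++ [i])
    simp [PySem.Dict.keys_empty]
  have hkeys : (l.foldl (fun d i => d.modify (R i) [] (fun g => g ++ [i]))
      PySem.Dict.empty).keys = PySem.Set.ofList (l.map R) := by
    rw [PySem.Dict.keys_foldl_modify_key l R [] (fun _ i => fun g => g ++ [i]),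
      PySem.Dict.keys_empty]
    rfl
  rw [PySem.Dict.values_eq_map_keys _ hnd [], hkeys]
  apply List.map_congr_left
  intro c _
  have hpair : l.foldl (fun d i => d.modify (R i) [] (fun g => g ++ [i])) PySem.Dict.empty
      = (l.map (fun i => (R i, i))).foldl
          (fun d p => d.modify p.1 [] (fun g => g ++ [p.2])) PySem.Dict.empty := by
    rw [List.foldl_map]
  rw [hpair, PySem.Dict.getD_foldl_modify_append, PySem.Dict.getD_empty, List.filter_map]
  simp only [List.map_map]
  rw [List.nil_append]
  have e1 : (fun (p : Int × Int) => p.1 == c) ∘ (fun i => (R i, i)) = fun i => R i == c := rfl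
  rw [e1]
  have e2 : ((fun (x : Int × Int) => x.2) ∘ fun i => (R i, i)) = fun (i : Int) => i := rfl
  rw [e2, List.map_id']

-- ---- the B-side adjacency dict ----

def pvAdjF (adj : PySem.Dict Int (List Int)) : Int → List Int := fun v => adj.getD v []

theorem pvMemRange {n x : Int} : x ∈ pvRangeL n ↔ pvInR n x := by
  unfold pvRangeL
  rw [PySem.List.mem_pyRange_one]
  unfold pvInR
  omega

theorem pvAdj0 {n : Int} :
    ∀ v, pvAdjF ((pvRangeL n).foldl (fun d i => d.insert i ([] : List Int)) PySem.Dict.empty) v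
      = [] := by
  suffices h : ∀ (l : List Int) (d : PySem.Dict Int (List Int)), (∀ w, d.getD w [] = []) →
      ∀ v, (l.foldl (fun d i => d.insert i ([] : List Int)) d).getD v [] = [] by
    intro v
    exact h (pvRangeL n) PySem.Dict.empty (fun w => by rw [PySem.Dict.getD_empty]) v
  intro l
  induction l with
  | nil => intro d hd v; exact hd v
  | cons x l ih =>
    intro d hd v
    rw [List.foldl_cons]
    apply ih
    intro w
    rw [PySem.Dict.getD_insert]
    split
    · rfl
    · exact hd w

theorem pvMem_modify (d : PySem.Dict Int (List Int)) (a b v w : Int) :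
    w ∈ pvAdjF (d.modify a [] (fun l => l ++ [b])) v ↔ (w ∈ pvAdjF d v ∨ (v = a ∧ w = b)) := by
  unfold pvAdjF
  rw [PySem.Dict.getD_modify]
  split_ifs with h
  · subst h
    simp
  · simp [h]

theorem pvAdj_mem :
    ∀ (es : List (Int × Int × Int)) (d : PySem.Dict Int (List Int)) (E0 : List (Int × Int)),
    (∀ v w, w ∈ pvAdjF d v ↔ pvStep E0 v w) →
    ∀ v w, (w ∈ pvAdjF (es.foldl (fun d e =>
        (d.modify e.1 [] (fun l => l ++ [e.2.1])).modify e.2.1 [] (fun l => l ++ [e.1])) d) v ↔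
      pvStep (E0 ++ es.map (fun e => (e.1, e.2.1))) v w) := by
  intro es
  induction es with
  | nil =>
    intro d E0 hd v w
    simpa using hd v w
  | cons e es ih =>
    intro d E0 hd v w
    have hstep : ∀ v w, (w ∈ pvAdjF ((d.modify e.1 [] (fun l => l ++ [e.2.1])).modify e.2.1 []
        (fun l => l ++ [e.1])) v ↔ pvStep (E0 ++ [(e.1, e.2.1)]) v w) := by
      intro v w
      rw [pvMem_modify, pvMem_modify, pvStep_append_iff, hd v w]
      tauto
    have := ih _ (E0 ++ [(e.1, e.2.1)]) hstep v w
    rw [List.foldl_cons]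
    rw [this, List.append_assoc]
    rfl

theorem pvSum_bump : ∀ (rl : List Int), rl.Nodup → ∀ (a : Int), a ∈ rl →
    ∀ (f f' : Int → Nat), (∀ x, x ≠ a → f' x = f x) → f' a = f a + 1 →
    (rl.map f').sum = (rl.map f).sum + 1 := by
  intro rl
  induction rl with
  | nil => intro _ a ha; simp at ha
  | cons x rl ih =>
    intro hnd a ha f f' hoth hat
    rcases List.mem_cons.mp ha with rfl | ha'
    · have : rl.map f' = rl.map f := by
        apply List.map_congr_left
        intro y hy
        exact hoth y (fun e => (List.nodup_cons.mp hnd).1 (e ▸ hy))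
      simp only [List.map_cons, List.sum_cons, hat, this]
      omega
    · have hx : f' x = f x := hoth x (fun e => (List.nodup_cons.mp hnd).1 (e ▸ ha'))
      simp only [List.map_cons, List.sum_cons, hx,
        ih (List.nodup_cons.mp hnd).2 a ha' f f' hoth hat]
      omega

theorem pvAdj_total {n : Int} :
    ∀ (es : List (Int × Int × Int)) (d : PySem.Dict Int (List Int)),
    (∀ e ∈ es, pvInR n e.1 ∧ pvInR n e.2.1) →
    ((pvRangeL n).map (fun v => (pvAdjF (es.foldl (fun d e =>
        (d.modify e.1 [] (fun l => l ++ [e.2.1])).modify e.2.1 [] (fun l => l ++ [e.1])) d) v).length)).sum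
      = ((pvRangeL n).map (fun v => (pvAdjF d v).length)).sum + 2 * es.length := by
  intro es
  induction es with
  | nil => intro d _; simp
  | cons e es ih =>
    intro d hes
    have he := hes e List.mem_cons_self
    have hnd : (pvRangeL n).Nodup := by
      unfold pvRangeL
      exact PySem.List.nodup_pyRange_one 1 (n + 1)
    rw [List.foldl_cons, ih _ (fun e' he' => hes e' (List.mem_cons_of_mem _ he'))]
    have h1 : ((pvRangeL n).map (fun v => (pvAdjF (d.modify e.1 []
        (fun l => l ++ [e.2.1])) v).length)).sum
        = ((pvRangeL n).map (fun v => (pvAdjF d v).length)).sum + 1 := by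
      apply pvSum_bump (pvRangeL n) hnd e.1 (pvMemRange.mpr he.1)
      · intro x hx
        unfold pvAdjF
        rw [PySem.Dict.getD_modify, if_neg hx]
      · unfold pvAdjF
        rw [PySem.Dict.getD_modify, if_pos rfl]
        simp
    have h2 : ((pvRangeL n).map (fun v => (pvAdjF ((d.modify e.1 []
        (fun l => l ++ [e.2.1])).modify e.2.1 [] (fun l => l ++ [e.1])) v).length)).sum
        = ((pvRangeL n).map (fun v => (pvAdjF (d.modify e.1 []
            (fun l => l ++ [e.2.1])) v).length)).sum + 1 := by
      apply pvSum_bump (pvRangeL n) hnd e.2.1 (pvMemRange.mpr he.2)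
      · intro x hx
        unfold pvAdjF
        rw [PySem.Dict.getD_modify (d := d.modify e.1 [] (fun l => l ++ [e.2.1])), if_neg hx]
      · unfold pvAdjF
        rw [PySem.Dict.getD_modify (d := d.modify e.1 [] (fun l => l ++ [e.2.1])), if_pos rfl]
        simp
    rw [h2, h1]
    simp only [List.length_cons]
    omega

-- ---- the DFS loop ----

def pvSU (g : Int → List Int) (rl vis : List Int) : Nat :=
  ((rl.filter (fun x => !(List.elem x vis))).map (fun v => (g v).length)).sum

theorem pvSU_le (g : Int → List Int) (vis : List Int) : ∀ (rl : List Int),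
    pvSU g rl vis ≤ ((rl.map (fun v => (g v).length))).sum := by
  intro rl
  induction rl with
  | nil => simp [pvSU]
  | cons x rl ih =>
    unfold pvSU at ih ⊢
    rw [List.filter_cons]
    by_cases hx : (!List.elem x vis) = true
    · rw [if_pos hx]
      simp only [List.map_cons, List.sum_cons]
      omega
    · rw [if_neg hx]
      simp only [List.map_cons, List.sum_cons]
      omega

theorem pvSU_drop (g : Int → List Int) : ∀ (rl : List Int), rl.Nodup → ∀ (vis : List Int)
    (v : Int), v ∈ rl → v ∉ vis →
    pvSU g rl (vis ++ [v]) + (g v).length = pvSU g rl vis := by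
  intro rl
  induction rl with
  | nil => intro _ vis v hv; simp at hv
  | cons x rl ih =>
    intro hnd vis v hv hnv
    unfold pvSU
    rcases List.mem_cons.mp hv with rfl | hv'
    · have hfeq : rl.filter (fun x => !decide (x ∈ vis) && !decide (x = v))
          = rl.filter (fun x => !decide (x ∈ vis)) := by
        apply List.filter_congr
        intro y hy
        have hne : y ≠ v := fun e => (List.nodup_cons.mp hnd).1 (e ▸ hy)
        simp [hne]
      simp [List.elem_eq_contains, hnv, hfeq]
      omega
    · have hxv : x ≠ v := fun e => (List.nodup_cons.mp hnd).1 (e ▸ hv')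
      have hrec := ih (List.nodup_cons.mp hnd).2 vis v hv' hnv
      unfold pvSU at hrec
      rw [List.filter_cons, List.filter_cons]
      have he : List.elem x (vis ++ [v]) = List.elem x vis := by
        simp [List.elem_eq_contains, hxv]
      rw [he]
      by_cases hx : (!List.elem x vis) = true
      · rw [if_pos hx, if_pos hx]
        simp only [List.map_cons, List.sum_cons]
        omega
      · rw [if_neg hx, if_neg hx]
        omega

theorem pvClosed_conn {E : List (Int × Int)} {vis0 : List Int}
    (hc : ∀ a b, a ∈ vis0 → pvStep E a b → b ∈ vis0) :
    ∀ a b, a ∈ vis0 → pvConn E a b → b ∈ vis0 := by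
  intro a b ha h
  induction h with
  | refl => exact ha
  | tail _ hbc ih => exact hc _ _ ih hbc

theorem pvDfs_master {n : Int} {adj : PySem.Dict Int (List Int)} {E : List (Int × Int)}
    (hadj : ∀ v w, w ∈ pvAdjF adj v ↔ pvStep E v w)
    (hEin : ∀ e ∈ E, pvInR n e.1 ∧ pvInR n e.2) {i : Int} (hi : pvInR n i) :
    ∀ (fuel : Nat) (stack vis comp vis0 : List Int),
    stack.length + pvSU (pvAdjF adj) (pvRangeL n) vis < fuel →
    vis = vis0 ++ comp →
    vis.Nodup →
    (∀ s ∈ stack, pvConn E i s) →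
    (∀ x ∈ comp, pvConn E i x) →
    (∀ a b, a ∈ vis → pvStep E a b → b ∈ vis ∨ b ∈ stack) →
    (∀ a b, a ∈ vis0 → pvStep E a b → b ∈ vis0) →
    i ∉ vis0 →
    (i ∈ comp ∨ i ∈ stack) →
    (pvDfs fuel adj stack vis comp).1 = vis0 ++ (pvDfs fuel adj stack vis comp).2 ∧
    (pvDfs fuel adj stack vis comp).1.Nodup ∧
    (pvDfs fuel adj stack vis comp).2.Nodup ∧
    (∀ x, x ∈ (pvDfs fuel adj stack vis comp).2 ↔ pvConn E i x) := by
  intro fuel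
  induction fuel with
  | zero => intro stack vis comp vis0 hf; omega
  | succ fuel ih =>
    intro stack vis comp vis0 hf hsplit hnd hstack hcomp hclose hvis0 hi0 hii
    rcases List.eq_nil_or_concat stack with rfl | ⟨st', v, rfl⟩
    · -- stack empty: the loop ends
      have hres : pvDfs (fuel + 1) adj [] vis comp = (vis, comp) := by
        simp [pvDfs, PySem.List.pop?]
      rw [hres]
      have hcompnd : comp.Nodup := by
        rw [hsplit] at hnd
        exact hnd.of_append_right
      refine ⟨hsplit, hnd, hcompnd, fun x => ⟨hcomp x, fun hx => ?_⟩⟩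
      have hicomp : i ∈ comp := by
        rcases hii with h | h
        · exact h
        · simp at h
      have hxvis : x ∈ vis := by
        clear hicomp
        induction hx with
        | refl =>
          rw [hsplit]
          rcases hii with h | h
          · exact List.mem_append_right _ h
          · simp at h
        | tail _ hbc ih2 =>
          rcases hclose _ _ ih2 hbc with h | h
          · exact h
          · simp at h
      rw [hsplit] at hxvis
      rcases List.mem_append.mp hxvis with h | h
      · exact absurd (pvClosed_conn hvis0 _ _ h (pvConn_symm hx)) hi0
      · exact h
    · -- pop the last element v
      simp only [List.concat_eq_append] at hf hstack hclose hii ⊢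
      have hpop : PySem.List.pop? (st' ++ [v]) (-1) = some (v, st') := PySem.List.pop?_last _ _
      by_cases hv : v ∈ vis
      · have hres : pvDfs (fuel + 1) adj (st' ++ [v]) vis comp = pvDfs fuel adj st' vis comp := by
          simp only [pvDfs, hpop]
          rw [if_pos ((PySem.Set.contains_iff vis v).mpr hv)]
        rw [hres]
        apply ih st' vis comp vis0 _ hsplit hnd
          (fun s hs => hstack s (List.mem_append_left _ hs)) hcomp _ hvis0 hi0
        · rcases hii with h | h
          · exact Or.inl h
          · rcases List.mem_append.mp h with h | h
            · exact Or.inr h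
            · rw [List.mem_singleton] at h
              subst h
              rw [hsplit] at hv
              rcases List.mem_append.mp hv with h | h
              · exact absurd h hi0
              · exact Or.inl h
        · simp only [List.length_append, List.length_singleton] at hf
          omega
        · intro a b ha hs
          rcases hclose a b ha hs with h | h
          · exact Or.inl h
          · rcases List.mem_append.mp h with h | h
            · exact Or.inr h
            · rw [List.mem_singleton] at h
              exact Or.inl (h ▸ hv)
      · -- v is new: visit it and push its neighbours
        have hconn_v : pvConn E i v := hstack v (List.mem_append_right _ (List.mem_singleton.mpr rfl))
        have hvinR : pvInR n v := by
          rcases pvConn_inR hEin hconn_v with rfl | h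
          · exact hi
          · exact h
        have hres : pvDfs (fuel + 1) adj (st' ++ [v]) vis comp =
            pvDfs fuel adj (st' ++ pvAdjF adj v) (vis ++ [v]) (comp ++ [v]) := by
          simp only [pvDfs, hpop]
          rw [if_neg (by rw [PySem.Set.contains_iff]; simpa using hv)]
          have : PySem.Set.add vis v = vis ++ [v] := by
            unfold PySem.Set.add
            rw [if_neg (by rw [PySem.Set.contains_iff]; simpa using hv)]
          rw [this]
          rfl
        rw [hres]
        have hSU := pvSU_drop (pvAdjF adj) (pvRangeL n)
          (by unfold pvRangeL; exact PySem.List.nodup_pyRange_one 1 (n + 1)) vis v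
          (pvMemRange.mpr hvinR) hv
        apply ih (st' ++ pvAdjF adj v) (vis ++ [v]) (comp ++ [v]) vis0
        · simp only [List.length_append, List.length_singleton] at hf ⊢
          omega
        · rw [hsplit, List.append_assoc]
        · rw [List.nodup_append]
          refine ⟨hnd, List.nodup_singleton v, ?_⟩
          intro a ha b hb
          rw [List.mem_singleton] at hb
          subst hb
          exact fun e => hv (e ▸ ha)
        · intro s hs
          rcases List.mem_append.mp hs with h | h
          · exact hstack s (List.mem_append_left _ h)
          · exact hconn_v.tail ((hadj v s).mp h)
        · intro x hx
          rcases List.mem_append.mp hx with h | h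
          · exact hcomp x h
          · rw [List.mem_singleton] at h
            exact h ▸ hconn_v
        · intro a b ha hs
          rcases List.mem_append.mp ha with ha' | ha'
          · rcases hclose a b ha' hs with h | h
            · exact Or.inl (List.mem_append_left _ h)
            · rcases List.mem_append.mp h with h | h
              · exact Or.inr (List.mem_append_left _ h)
              · rw [List.mem_singleton] at h
                exact Or.inl (List.mem_append_right _ (by simp [h]))
          · rw [List.mem_singleton] at ha'
            subst ha'
            exact Or.inr (List.mem_append_right _ ((hadj a b).mpr hs))
        · exact hvis0
        · exact hi0
        · rcases hii with h | h
          · exact Or.inl (List.mem_append_left _ h)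
          · rcases List.mem_append.mp h with h | h
            · exact Or.inr (List.mem_append_left _ h)
            · rw [List.mem_singleton] at h
              exact Or.inl (List.mem_append_right _ (by simp [h]))

-- ---- first occurrences of the classes, in order ----

def pvNewClasses (R : Int → Int) : List Int → List Int → List Int
  | _, [] => []
  | seen, i :: l =>
    if PySem.Set.contains seen (R i) then pvNewClasses R seen l
    else R i :: pvNewClasses R (seen ++ [R i]) l

theorem pvNC_congr (R : Int → Int) : ∀ (l s1 s2 : List Int), (∀ x, x ∈ s1 ↔ x ∈ s2) →
    pvNewClasses R s1 l = pvNewClasses R s2 l := by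
  intro l
  induction l with
  | nil => intro s1 s2 _; rfl
  | cons i l ih =>
    intro s1 s2 hs
    simp only [pvNewClasses]
    have hc : PySem.Set.contains s1 (R i) = PySem.Set.contains s2 (R i) := by
      by_cases h : R i ∈ s2
      · rw [(PySem.Set.contains_iff _ _).mpr h, (PySem.Set.contains_iff _ _).mpr ((hs _).mpr h)]
      · have h1 : ¬ R i ∈ s1 := fun hh => h ((hs _).mp hh)
        have e1 : PySem.Set.contains s1 (R i) = false := by
          cases he : PySem.Set.contains s1 (R i)
          · rfl
          · exact absurd ((PySem.Set.contains_iff _ _).mp he) h1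
        have e2 : PySem.Set.contains s2 (R i) = false := by
          cases he : PySem.Set.contains s2 (R i)
          · rfl
          · exact absurd ((PySem.Set.contains_iff _ _).mp he) h
        rw [e1, e2]
    rw [hc]
    by_cases h : PySem.Set.contains s2 (R i) = true
    · rw [if_pos h, if_pos h]
      exact ih s1 s2 hs
    · rw [if_neg h, if_neg h]
      rw [ih (s1 ++ [R i]) (s2 ++ [R i]) (by intro x; simp [hs x])]

theorem pvNewClasses_spec (R : Int → Int) : ∀ (l s : List Int),
    PySem.Set.update s (l.map R) = s ++ pvNewClasses R s l := by
  intro l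
  induction l with
  | nil => intro s; simp [PySem.Set.update, pvNewClasses]
  | cons i l ih =>
    intro s
    have hstep : PySem.Set.update s ((i :: l).map R)
        = PySem.Set.update (PySem.Set.add s (R i)) (l.map R) := rfl
    rw [hstep]
    simp only [pvNewClasses]
    by_cases h : PySem.Set.contains s (R i) = true
    · have hadd : PySem.Set.add s (R i) = s := by
        unfold PySem.Set.add
        rw [if_pos h]
      rw [hadd, if_pos h, ih s]
    · have hadd : PySem.Set.add s (R i) = s ++ [R i] := by
        unfold PySem.Set.add
        rw [if_neg h]
      rw [hadd, if_neg h, ih (s ++ [R i]), List.append_assoc]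
      rfl

-- ---- the B-side outer loop ----

theorem pvB_fold {n : Int} {adj : PySem.Dict Int (List Int)} {E : List (Int × Int)}
    {R : Int → Int} (fuel : Nat)
    (hadj : ∀ v w, w ∈ pvAdjF adj v ↔ pvStep E v w)
    (hEin : ∀ e ∈ E, pvInR n e.1 ∧ pvInR n e.2)
    (hRC : ∀ a b, pvInR n a → pvInR n b → (R a = R b ↔ pvConn E a b))
    (hfuel : ((pvRangeL n).map (fun v => (pvAdjF adj v).length)).sum + 1 < fuel) :
    ∀ (l pr : List Int), pr ++ l = pvRangeL n →
    ∀ (vis : List Int) (grupos : List (List Int)),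
    (∀ x, x ∈ vis ↔ (pvInR n x ∧ R x ∈ pr.map R)) →
    vis.Nodup →
    (l.foldl (fun (st : PySem.Set Int × List (List Int)) i =>
        if PySem.Set.contains st.1 i then st
        else ((pvDfs fuel adj [i] st.1 []).1,
          st.2 ++ [PySem.List.sorted (pvDfs fuel adj [i] st.1 []).2 (fun x => x) false]))
        (vis, grupos)).2
      = grupos ++ (pvNewClasses R (pr.map R) l).map
          (fun c => (pvRangeL n).filter (fun j => R j == c)) := by
  intro l
  induction l with
  | nil =>
    intro pr _ vis grupos _ _
    simp [pvNewClasses]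
  | cons i l ih =>
    intro pr hpr vis grupos hvis hnd
    have hiR : pvInR n i := by
      rw [← pvMemRange (n := n)]
      rw [← hpr]
      exact List.mem_append_right _ List.mem_cons_self
    have hconts : PySem.Set.contains vis i = true ↔ R i ∈ pr.map R := by
      rw [PySem.Set.contains_iff, hvis i]
      exact ⟨fun h => h.2, fun h => ⟨hiR, h⟩⟩
    rw [List.foldl_cons]
    by_cases hc : PySem.Set.contains vis i = true
    · rw [if_pos hc]
      have hRi : R i ∈ pr.map R := hconts.mp hc
      have hvis' : ∀ x, x ∈ vis ↔ (pvInR n x ∧ R x ∈ (pr ++ [i]).map R) := by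
        intro x
        rw [hvis x, List.map_append]
        constructor
        · rintro ⟨h1, h2⟩
          exact ⟨h1, List.mem_append_left _ h2⟩
        · rintro ⟨h1, h2⟩
          rcases List.mem_append.mp h2 with h | h
          · exact ⟨h1, h⟩
          · rw [List.map_singleton, List.mem_singleton] at h
            exact ⟨h1, h ▸ hRi⟩
      have := ih (pr ++ [i]) (by rw [List.append_assoc]; exact hpr) vis grupos hvis' hnd
      rw [this]
      simp only [pvNewClasses]
      rw [if_pos ((PySem.Set.contains_iff _ _).mpr hRi)]
      congr 1
      congr 1
      apply pvNC_congr
      intro x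
      rw [List.map_append, List.map_singleton]
      constructor
      · intro h
        rcases List.mem_append.mp h with h | h
        · exact h
        · rw [List.mem_singleton] at h
          exact h ▸ hRi
      · intro h
        exact List.mem_append_left _ h
    · rw [if_neg hc]
      have hinv : i ∉ vis := fun h => hc ((PySem.Set.contains_iff _ _).mpr h)
      have hRifresh : ¬ R i ∈ pr.map R := fun h => hc (hconts.mpr h)
      have hclosed : ∀ a b, a ∈ vis → pvStep E a b → b ∈ vis := by
        intro a b ha hs
        have ha' := (hvis a).mp ha
        have hbR : pvInR n b := by
          rcases hs with h | h
          · exact (hEin _ h).2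
          · exact (hEin _ h).1
        have : R a = R b := (hRC a b ha'.1 hbR).mpr (Relation.ReflTransGen.single hs)
        rw [hvis b]
        exact ⟨hbR, this ▸ ha'.2⟩
      have hdfs := pvDfs_master hadj hEin hiR fuel [i] vis [] vis
        (by
          have := pvSU_le (pvAdjF adj) vis (pvRangeL n)
          simp only [List.length_singleton]
          omega)
        (by simp) hnd
        (by intro s hs; rw [List.mem_singleton] at hs; exact hs ▸ Relation.ReflTransGen.refl)
        (by intro x hx; simp at hx)
        (fun a b ha hs => Or.inl (hclosed a b ha hs))
        hclosed hinv (Or.inr List.mem_cons_self)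
      obtain ⟨hsplit', hndvis', hndcomp', hmem'⟩ := hdfs
      have hcompR : ∀ x, x ∈ (pvDfs fuel adj [i] vis []).2 ↔ (pvInR n x ∧ R x = R i) := by
        intro x
        rw [hmem' x]
        constructor
        · intro h
          have hxR : pvInR n x := by
            rcases pvConn_inR hEin h with rfl | hh
            · exact hiR
            · exact hh
          exact ⟨hxR, (hRC x i hxR hiR).mpr (pvConn_symm h)⟩
        · rintro ⟨h1, h2⟩
          exact pvConn_symm ((hRC x i h1 hiR).mp h2)
      have hsorted : PySem.List.sorted (pvDfs fuel adj [i] vis []).2 (fun x => x) false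
          = (pvRangeL n).filter (fun j => R j == R i) := by
        apply PySem.List.sorted_eq_of_perm_of_pairwise_lt
        · rw [List.perm_ext_iff_of_nodup (List.Nodup.filter _ (by
            unfold pvRangeL; exact PySem.List.nodup_pyRange_one 1 (n + 1))) hndcomp']
          intro x
          rw [List.mem_filter, pvMemRange, hcompR x]
          constructor
          · rintro ⟨h1, h2⟩
            exact ⟨h1, by simpa using h2⟩
          · rintro ⟨h1, h2⟩
            exact ⟨h1, by simpa using h2⟩
        · have hp : (pvRangeL n).Pairwise (· < ·) := by
            unfold pvRangeL
            exact PySem.List.pairwise_lt_pyRange_one 1 (n + 1)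
          exact List.Pairwise.sublist List.filter_sublist hp
      have hvis'' : ∀ x, x ∈ (pvDfs fuel adj [i] vis []).1 ↔
          (pvInR n x ∧ R x ∈ (pr ++ [i]).map R) := by
        intro x
        rw [hsplit', List.mem_append, hvis x, hcompR x, List.map_append, List.map_singleton]
        constructor
        · rintro (⟨h1, h2⟩ | ⟨h1, h2⟩)
          · exact ⟨h1, List.mem_append_left _ h2⟩
          · exact ⟨h1, List.mem_append_right _ (by simp [h2])⟩
        · rintro ⟨h1, h2⟩
          rcases List.mem_append.mp h2 with h | h
          · exact Or.inl ⟨h1, h⟩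
          · rw [List.mem_singleton] at h
            exact Or.inr ⟨h1, h⟩
      have := ih (pr ++ [i]) (by rw [List.append_assoc]; exact hpr)
        (pvDfs fuel adj [i] vis []).1
        (grupos ++ [PySem.List.sorted (pvDfs fuel adj [i] vis []).2 (fun x => x) false])
        hvis'' hndvis'
      rw [this]
      simp only [pvNewClasses]
      rw [if_neg (by
        intro hh
        exact hRifresh ((PySem.Set.contains_iff _ _).mp hh))]
      rw [List.map_cons, hsorted, List.append_assoc, List.map_append, List.map_singleton,
        List.singleton_append]

-- ===== VERDICT (by name: the statement is the Claim_ definition above) =====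
theorem formar_grupos_spec : Claim_equal_formar_grupos := by
  intro ligacoes num_pontos k _ hPre
  show formar_grupos ligacoes num_pontos k = formar_grupos_alt ligacoes num_pontos k
  unfold formar_grupos formar_grupos_alt
  simp only []
  rw [show PySem.List.pyRange 1 (num_pontos + 1) 1 = pvRangeL num_pontos from rfl]
  set ligs := PySem.List.sorted ligacoes (fun x => x.2.2) true with hligs
  set kept := PySem.List.slice ligs (some (k - 1)) none with hkeptdef
  have hkeptmem : ∀ e ∈ kept, pvInR num_pontos e.1 ∧ pvInR num_pontos e.2.1 := by
    intro e he
    exact ⟨(hPre e he).1, (hPre e he).2⟩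
  -- A side: union-find
  set pais0 := (pvRangeL num_pontos).foldl (fun d i => d.insert i i) PySem.Dict.empty with hpais0
  have h0p : ∀ v, pvP pais0 v = v := pvInit_getD
  have h0good : pvGood num_pontos (pvP pais0) := by
    intro u hu
    refine ⟨by rw [h0p u]; exact hu, ⟨0, by simpa using h0p u⟩⟩
  have h0eq : ∀ a b, pvInR num_pontos a → pvInR num_pontos b →
      (pvRoot (pvP pais0) a = pvRoot (pvP pais0) b ↔ pvConn [] a b) := by
    intro a b _ _
    rw [pvRoot_of_fix (h0p a), pvRoot_of_fix (h0p b)]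
    constructor
    · intro h
      exact h ▸ Relation.ReflTransGen.refl
    · exact pvConn_nil
  obtain ⟨hk1, hG1, hEq1⟩ := pvUF_fold kept pais0 [] pvInit_keys h0good h0eq hkeptmem
  set pais1 := kept.foldl (fun p e => pvUnir (num_pontos.toNat + 1) p e.1 e.2.1) pais0 with hpais1
  set R := fun i => pvRoot (pvP pais1) i with hRdef
  set E := kept.map (fun e => (e.1, e.2.1)) with hEdef
  rw [List.nil_append] at hEq1
  have hgroup := pvGroup_fold (n := num_pontos) R (pvRangeL num_pontos) pais1 PySem.Dict.empty
    hk1 hG1 (fun v _ => rfl) (fun x hx => pvMemRange.mp hx)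
  rw [hgroup, pvA_values R (pvRangeL num_pontos)]
  -- B side: DFS over the adjacency dict
  set adj0 := (pvRangeL num_pontos).foldl (fun d i => d.insert i ([] : List Int))
    PySem.Dict.empty with hadj0
  set adj := kept.foldl (fun d e =>
    (d.modify e.1 [] (fun l => l ++ [e.2.1])).modify e.2.1 [] (fun l => l ++ [e.1])) adj0 with hadjdef
  have hadjmem : ∀ v w, w ∈ pvAdjF adj v ↔ pvStep E v w := by
    have hbase : ∀ v w, w ∈ pvAdjF adj0 v ↔ pvStep ([] : List (Int × Int)) v w := by
      intro v w
      rw [hadj0, pvAdj0 (n := num_pontos) v]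
      unfold pvStep
      simp
    have := pvAdj_mem kept adj0 [] hbase
    intro v w
    rw [hadjdef, hEdef]
    simpa using this v w
  have hEin : ∀ e ∈ E, pvInR num_pontos e.1 ∧ pvInR num_pontos e.2 := by
    rw [hEdef]
    intro e he
    obtain ⟨x, hx, rfl⟩ := List.mem_map.mp he
    exact ⟨(hkeptmem x hx).1, (hkeptmem x hx).2⟩
  have hRC : ∀ a b, pvInR num_pontos a → pvInR num_pontos b →
      (R a = R b ↔ pvConn E a b) := fun a b ha hb => hEq1 a b ha hb
  have hbase0 : ((pvRangeL num_pontos).map (fun v => (pvAdjF adj0 v).length)).sum = 0 := by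
    apply List.sum_eq_zero
    intro x hx
    obtain ⟨v, _, rfl⟩ := List.mem_map.mp hx
    rw [hadj0, pvAdj0 (n := num_pontos) v]
    rfl
  have htotal := pvAdj_total (n := num_pontos) kept adj0 hkeptmem
  have hfuel : ((pvRangeL num_pontos).map (fun v => (pvAdjF adj v).length)).sum + 1
      < 2 * kept.length + 2 := by
    rw [hadjdef, htotal, hbase0]
    omega
  have hBfold := pvB_fold (2 * kept.length + 2) hadjmem hEin hRC hfuel
    (pvRangeL num_pontos) [] (List.nil_append _) [] []
    (by intro x; simp) List.nodup_nil
  rw [show (PySem.Set.empty : PySem.Set Int) = ([] : List Int) from rfl]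
  rw [hBfold]
  rw [List.nil_append]
  have hNC : PySem.Set.ofList ((pvRangeL num_pontos).map R)
      = pvNewClasses R [] (pvRangeL num_pontos) := by
    rw [show PySem.Set.ofList ((pvRangeL num_pontos).map R)
        = PySem.Set.update [] ((pvRangeL num_pontos).map R) from rfl,
      pvNewClasses_spec R (pvRangeL num_pontos) []]
    rfl
  rw [hNC]
  rfl
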